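-- pv_equiv track=rewrite | github.com/widingmarcus-cyber/opengym | cli/run.py | _detect_scope_violations
-- ===== SOURCE A (Python) =====
-- ALLOWED_MUTATION_PREFIXES = (
--     "setup/",
--     "tools/.state/",
-- )
--
-- ALLOWED_MUTATION_FILES = {
--     ".opengym_task.md",
--     "tools/_audit.py",
-- }
--
-- def _is_allowed_mutation(relative_path: str) -> bool:
--     """Return True if a changed file path is allowed to mutate."""
--     if relative_path in ALLOWED_MUTATION_FILES:
--         return True
--     return any(relative_path.startswith(prefix) for prefix in ALLOWED_MUTATION_PREFIXES)
--
-- def _detect_scope_violations(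
--     before: dict[str, str], after: dict[str, str]
-- ) -> list[str]:
--     """Return changed file paths outside permitted mutation scope."""
--     violations = []
--     for path in sorted(set(before) | set(after)):
--         if before.get(path) == after.get(path):
--             continue
--         if not _is_allowed_mutation(path):
--             violations.append(path)
--     return violations
-- ===== SOURCE B (Python) =====
-- ALLOWED_MUTATION_PREFIXES = (
--     "setup/",
--     "tools/.state/",
-- )
--
-- ALLOWED_MUTATION_FILES = {
--     ".opengym_task.md",
--     "tools/_audit.py",
-- }
--
-- def _is_allowed_mutation(relative_path):
--     """Return True if a changed file path is allowed to mutate."""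
--     if relative_path in ALLOWED_MUTATION_FILES:
--         return True
--     return any(relative_path.startswith(prefix) for prefix in ALLOWED_MUTATION_PREFIXES)
--
-- def _detect_scope_violations(before, after):
--     """Return changed file paths outside permitted mutation scope.
--
--     Two-pointer merge of the two key-sorted item lists: emits the violation
--     list already in sorted order, with no key-union set and no dict lookups.
--     """
--     bs = sorted(before.items(), key=lambda kv: kv[0])
--     asrt = sorted(after.items(), key=lambda kv: kv[0])
--     out = []
--     i = j = 0
--     while i < len(bs) and j < len(asrt):
--         kb, vb = bs[i]
--         ka, va = asrt[j]
--         if kb == ka: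
--             if vb != va and not _is_allowed_mutation(kb):
--                 out.append(kb)
--             i += 1
--             j += 1
--         elif kb < ka:
--             if not _is_allowed_mutation(kb):
--                 out.append(kb)
--             i += 1
--         else:
--             if not _is_allowed_mutation(ka):
--                 out.append(ka)
--             j += 1
--     while i < len(bs):
--         if not _is_allowed_mutation(bs[i][0]):
--             out.append(bs[i][0])
--         i += 1
--     while j < len(asrt):
--         if not _is_allowed_mutation(asrt[j][0]):
--             out.append(asrt[j][0])
--         j += 1
--     return out
-- ===== Notes on version B (the rewrite author's own statement) =====
-- stated objective: alternative
-- what changed: B sorts the two item lists by key once and runs a two-pointer merge over them, emitting out-of-scope changed keys directly in sorted order, instead of A's scan over the sorted key union with paired dict .get lookups; no key-union set, no dict lookups, no final sort.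
import Mathlib
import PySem

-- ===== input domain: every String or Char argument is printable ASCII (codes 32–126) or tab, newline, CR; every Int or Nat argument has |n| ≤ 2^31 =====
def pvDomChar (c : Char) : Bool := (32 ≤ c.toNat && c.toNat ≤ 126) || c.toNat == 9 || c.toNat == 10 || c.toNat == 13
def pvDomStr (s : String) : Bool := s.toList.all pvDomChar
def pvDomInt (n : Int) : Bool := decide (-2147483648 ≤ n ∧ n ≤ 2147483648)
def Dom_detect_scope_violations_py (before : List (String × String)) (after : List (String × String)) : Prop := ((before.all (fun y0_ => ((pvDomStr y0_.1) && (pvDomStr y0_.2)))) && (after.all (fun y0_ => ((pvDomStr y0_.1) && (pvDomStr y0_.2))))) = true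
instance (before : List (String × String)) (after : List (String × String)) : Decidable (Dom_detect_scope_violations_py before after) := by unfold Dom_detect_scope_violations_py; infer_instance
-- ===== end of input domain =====

-- B replaces A's scan over the sorted key union with paired dict lookups by a two-pointer
-- merge of the two key-sorted item lists, emitting the violations already in order (alternative; same cost).

-- ===== PORT A =====
def is_allowed_mutation (relative_path : String) : Bool :=
  if PySem.Set.contains (PySem.Set.ofList [".opengym_task.md", "tools/_audit.py"]) relative_path then
    true
  else
    ["setup/", "tools/.state/"].any (fun prefix_ => PySem.Str.startswith relative_path prefix_)

def detect_scope_violations_py (before : List (String × String)) (after : List (String × String)) : List String :=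
  (PySem.List.sorted
      (PySem.Set.union (PySem.Set.ofList (PySem.Dict.keys (PySem.Dict.ofList before)))
        (PySem.Dict.keys (PySem.Dict.ofList after)))
      (fun x => x) false).foldl
    (fun violations path =>
      if PySem.Dict.get? (PySem.Dict.ofList before) path == PySem.Dict.get? (PySem.Dict.ofList after) path then violations
      else if !(is_allowed_mutation path) then violations ++ [path] else violations)
    []

-- ===== PORT B =====
-- B's while loops: the main two-pointer loop is the cons/cons case; the two trailing
-- drain loops are the [] cases (each appends the non-allowed keys of the remainder).
def mergeViol : List (String × String) → List (String × String) → List String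
  | [], asrt => (asrt.map Prod.fst).filter (fun k => !is_allowed_mutation k)
  | bs, [] => (bs.map Prod.fst).filter (fun k => !is_allowed_mutation k)
  | (kb, vb) :: bs, (ka, va) :: asrt =>
    if kb == ka then
      (if vb != va && !is_allowed_mutation kb then [kb] else []) ++ mergeViol bs asrt
    else if kb < ka then
      (if !is_allowed_mutation kb then [kb] else []) ++ mergeViol bs ((ka, va) :: asrt)
    else
      (if !is_allowed_mutation ka then [ka] else []) ++ mergeViol ((kb, vb) :: bs) asrt

def detect_scope_violations_py_alt (before : List (String × String)) (after : List (String × String)) : List String :=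
  mergeViol
    (PySem.List.sorted (PySem.Dict.items (PySem.Dict.ofList before)) (fun kv => kv.1) false)
    (PySem.List.sorted (PySem.Dict.items (PySem.Dict.ofList after)) (fun kv => kv.1) false)

-- ===== PRECONDITION & SPEC =====
def Spec_detect_scope_violations_py (before : List (String × String)) (after : List (String × String)) (out : List String) : Prop := out = detect_scope_violations_py_alt before after
instance (before : List (String × String)) (after : List (String × String)) (out : List String) : Decidable (Spec_detect_scope_violations_py before after out) := by unfold Spec_detect_scope_violations_py; infer_instance

-- ===== CLAIM (what is proved, stated in full; the proofs are below) =====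
def Claim_equal_detect_scope_violations_py : Prop := ∀ (before : List (String × String)) (after : List (String × String)), Dom_detect_scope_violations_py before after → Spec_detect_scope_violations_py before after (detect_scope_violations_py before after)

-- ===== LEMMAS AND PROOFS =====

-- A's accumulator loop is a filter.
theorem foldlA_filter (db da : PySem.Dict String String) (l : List String) (acc : List String) :
    l.foldl (fun violations path =>
      if PySem.Dict.get? db path == PySem.Dict.get? da path then violations
      else if !(is_allowed_mutation path) then violations ++ [path] else violations) acc
    = acc ++ l.filter (fun p => !(PySem.Dict.get? db p == PySem.Dict.get? da p) && !(is_allowed_mutation p)) := by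
  induction l generalizing acc with
  | nil => simp
  | cons x xs ih =>
    simp only [List.foldl_cons, List.filter_cons]
    by_cases h : (PySem.Dict.get? db x == PySem.Dict.get? da x) = true
    · rw [if_pos h, ih]; simp [h]
    · rw [if_neg h]
      by_cases h2 : is_allowed_mutation x = true
      · rw [if_neg (by simp [h2]), ih]; simp [h, h2]
      · rw [if_pos (by simp [h2]), ih]
        have h2' : is_allowed_mutation x = false := by simp [h2]
        have h' : (PySem.Dict.get? db x == PySem.Dict.get? da x) = false := by simp [h]
        simp [h', h2']

-- support of the merge: only keys of the two lists are emitted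
theorem mergeViol_support (bs asrt : List (String × String)) :
    ∀ x ∈ mergeViol bs asrt, x ∈ bs.map Prod.fst ∨ x ∈ asrt.map Prod.fst := by
  fun_induction mergeViol bs asrt with
  | case1 asrt => intro x hx; right; exact List.mem_of_mem_filter hx
  | case2 bs _ => intro x hx; left; exact List.mem_of_mem_filter hx
  | case3 kb vb bs ka va asrt heq ih =>
    intro x hx
    rcases List.mem_append.mp hx with h | h
    · left
      have : x = kb := by split at h <;> simp_all
      simp [this]
    · rcases ih x h with h' | h'
      · left; simp only [List.map_cons]; exact List.mem_cons_of_mem _ h'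
      · right; simp only [List.map_cons]; exact List.mem_cons_of_mem _ h'
  | case4 kb vb bs ka va asrt heq hlt ih =>
    intro x hx
    rcases List.mem_append.mp hx with h | h
    · left
      have : x = kb := by split at h <;> simp_all
      simp [this]
    · rcases ih x h with h' | h'
      · left; simp only [List.map_cons]; exact List.mem_cons_of_mem _ h'
      · right; exact h'
  | case5 kb vb bs ka va asrt heq hlt ih =>
    intro x hx
    rcases List.mem_append.mp hx with h | h
    · right
      have : x = ka := by split at h <;> simp_all
      simp [this]
    · rcases ih x h with h' | h'
      · left; exact h'
      · right; simp only [List.map_cons]; exact List.mem_cons_of_mem _ h'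

-- the merge output is strictly increasing when both inputs are key-sorted strictly
theorem mergeViol_pairwise (bs asrt : List (String × String))
    (hb : (bs.map Prod.fst).Pairwise (· < ·)) (ha : (asrt.map Prod.fst).Pairwise (· < ·)) :
    (mergeViol bs asrt).Pairwise (· < ·) := by
  fun_induction mergeViol bs asrt with
  | case1 asrt => exact List.Pairwise.sublist (List.filter_sublist) ha
  | case2 bs _ => exact List.Pairwise.sublist (List.filter_sublist) hb
  | case3 kb vb bs ka va asrt heq ih =>
    have hkb : kb = ka := by simpa using heq
    rw [List.map_cons, List.pairwise_cons] at hb ha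
    have hrec := ih hb.2 ha.2
    split
    · refine List.pairwise_cons.mpr ⟨?_, hrec⟩
      intro y hy
      rcases mergeViol_support _ _ y hy with h | h
      · exact hb.1 y h
      · rw [hkb]; exact ha.1 y h
    · simpa using hrec
  | case4 kb vb bs ka va asrt heq hlt ih =>
    rw [List.map_cons, List.pairwise_cons] at hb
    have hrec := ih hb.2 ha
    have hlt' : kb < ka := by simpa using hlt
    split
    · refine List.pairwise_cons.mpr ⟨?_, hrec⟩
      intro y hy
      rcases mergeViol_support _ _ y hy with h | h
      · exact hb.1 y h
      · rw [List.map_cons] at h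
        rcases List.mem_cons.mp h with rfl | h
        · exact hlt'
        · exact lt_trans hlt' ((List.pairwise_cons.mp (by rwa [List.map_cons] at ha)).1 y h)
    · simpa using hrec
  | case5 kb vb bs ka va asrt heq hlt ih =>
    rw [List.map_cons, List.pairwise_cons] at ha
    have hrec := ih hb ha.2
    have hgt : ka < kb := by
      have h1 : kb ≠ ka := by simpa using heq
      exact lt_of_le_of_ne (le_of_not_gt (by simpa using hlt)) (Ne.symm h1)
    split
    · refine List.pairwise_cons.mpr ⟨?_, hrec⟩
      intro y hy
      rcases mergeViol_support _ _ y hy with h | h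
      · rw [List.map_cons] at h
        rcases List.mem_cons.mp h with rfl | h
        · exact hgt
        · exact lt_trans hgt ((List.pairwise_cons.mp (by rwa [List.map_cons] at hb)).1 y h)
      · exact ha.1 y h
    · simpa using hrec

-- lookup in an association list with distinct keys finds precisely the contained pair
theorem lookup_eq_some_iff (l : List (String × String)) (h : (l.map Prod.fst).Nodup)
    (k v : String) : List.lookup k l = some v ↔ (k, v) ∈ l := by
  induction l with
  | nil => simp
  | cons x xs ih =>
    rw [List.map_cons, List.nodup_cons] at h
    rcases x with ⟨k', v'⟩
    by_cases hk : k = k'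
    · subst hk
      have hl : List.lookup k ((k, v') :: xs) = some v' := by simp [List.lookup]
      rw [hl, List.mem_cons]
      constructor
      · intro h'
        left
        have hv : v' = v := Option.some.inj h'
        rw [hv]
      · rintro (h' | h')
        · have hv : v = v' := (Prod.mk.injEq _ _ _ _ ▸ h').2
          rw [hv]
        · exact absurd (List.mem_map_of_mem (f := Prod.fst) h') h.1
    · have hb : (k == k') = false := beq_eq_false_iff_ne.mpr hk
      have hl : List.lookup k ((k', v') :: xs) = List.lookup k xs := by
        simp [List.lookup, hb]
      rw [hl, ih h.2, List.mem_cons]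
      constructor
      · exact Or.inr
      · rintro (h' | h')
        · exact absurd (Prod.mk.injEq _ _ _ _ ▸ h').1 hk
        · exact h'

theorem lookup_eq_none_iff (l : List (String × String)) (k : String) :
    List.lookup k l = none ↔ k ∉ l.map Prod.fst := by
  induction l with
  | nil => simp
  | cons x xs ih =>
    rcases x with ⟨k', v'⟩
    by_cases hk : k = k'
    · subst hk
      have hl : List.lookup k ((k, v') :: xs) = some v' := by simp [List.lookup]
      rw [hl]; simp
    · have hb : (k == k') = false := beq_eq_false_iff_ne.mpr hk
      have hl : List.lookup k ((k', v') :: xs) = List.lookup k xs := by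
        simp [List.lookup, hb]
      rw [hl, ih, List.map_cons, List.mem_cons]
      simp [hk]

-- lookup in any nodup-keyed rearrangement of a dict's items is the dict lookup
theorem lookup_perm_items (d : PySem.Dict String String) (l : List (String × String))
    (hp : l.Perm d.items) (hnd : (l.map Prod.fst).Nodup) (k : String) :
    List.lookup k l = d.get? k := by
  have hk : d.keys.Nodup := by
    have := hnd.perm (hp.map Prod.fst)
    simpa [PySem.Dict.keys] using this
  cases hv : d.get? k with
  | some v =>
    exact (lookup_eq_some_iff l hnd k v).mpr
      (hp.mem_iff.mpr ((PySem.Dict.get?_eq_some_iff_mem_items d _ _ hk).mp hv))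
  | none =>
    rw [lookup_eq_none_iff]
    intro hmem
    have : k ∈ d.keys := by
      have := (hp.map Prod.fst).mem_iff.mp hmem
      simpa [PySem.Dict.keys] using this
    rw [PySem.Dict.get?_eq_none_iff_not_mem_keys] at hv
    exact hv this

-- membership in the merge: exactly the non-allowed keys on which the two lookups differ
theorem mergeViol_mem (bs asrt : List (String × String))
    (hb : (bs.map Prod.fst).Pairwise (· < ·)) (ha : (asrt.map Prod.fst).Pairwise (· < ·))
    (k : String) :
    k ∈ mergeViol bs asrt ↔
      (!is_allowed_mutation k) = true ∧ List.lookup k bs ≠ List.lookup k asrt := by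
  fun_induction mergeViol bs asrt with
  | case1 asrt =>
    simp only [List.mem_filter, List.lookup]
    constructor
    · rintro ⟨hm, hal⟩
      exact ⟨hal, fun hc => ((lookup_eq_none_iff asrt k).mp hc.symm) hm⟩
    · rintro ⟨hal, hne⟩
      refine ⟨?_, hal⟩
      by_contra hm
      exact hne ((lookup_eq_none_iff asrt k).mpr hm).symm
  | case2 bs hnil =>
    simp only [List.mem_filter, List.lookup]
    constructor
    · rintro ⟨hm, hal⟩
      exact ⟨hal, fun hc => ((lookup_eq_none_iff bs k).mp hc) hm⟩
    · rintro ⟨hal, hne⟩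
      refine ⟨?_, hal⟩
      by_contra hm
      exact hne ((lookup_eq_none_iff bs k).mpr hm)
  | case3 kb vb bs ka va asrt heq ih =>
    have hkb : kb = ka := by simpa using heq
    subst hkb
    rw [List.map_cons, List.pairwise_cons] at hb ha
    by_cases hkk : kb = k
    · subst hkk
      have hnotrec : kb ∉ mergeViol bs asrt := by
        intro hc
        rcases mergeViol_support _ _ _ hc with h | h
        · exact absurd (hb.1 _ h) (lt_irrefl _)
        · exact absurd (ha.1 _ h) (lt_irrefl _)
      have hl1 : List.lookup kb ((kb, vb) :: bs) = some vb := by simp [List.lookup]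
      have hl2 : List.lookup kb ((kb, va) :: asrt) = some va := by simp [List.lookup]
      simp only [List.mem_append, hl1, hl2]
      constructor
      · rintro (h | h)
        · split at h
          · next hc =>
            simp only [List.mem_singleton] at h
            simp only [bne_iff_ne, Bool.and_eq_true] at hc
            exact ⟨hc.2, by simpa using hc.1⟩
          · simp at h
        · exact absurd h hnotrec
      · rintro ⟨hal, hne⟩
        left
        have hvne : vb ≠ va := by simpa using hne
        simp [hvne, hal]
    · have hq : (k == kb) = false := beq_eq_false_iff_ne.mpr (fun h => hkk h.symm)
      have hlk : List.lookup k ((kb, vb) :: bs) = List.lookup k bs := by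
        simp [List.lookup, hq]
      have hlk2 : List.lookup k ((kb, va) :: asrt) = List.lookup k asrt := by
        simp [List.lookup, hq]
      simp only [List.mem_append, hlk, hlk2]
      rw [← ih hb.2 ha.2]
      constructor
      · rintro (h | h)
        · exfalso; split at h <;> simp_all
        · exact h
      · exact Or.inr
  | case4 kb vb bs ka va asrt heq hlt ih =>
    rw [List.map_cons, List.pairwise_cons] at hb
    have hlt' : kb < ka := by simpa using hlt
    by_cases hkk : kb = k
    · subst hkk
      have hnone : List.lookup kb ((ka, va) :: asrt) = none := by
        rw [lookup_eq_none_iff]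
        intro hm
        rw [List.map_cons] at hm
        rcases List.mem_cons.mp hm with h | h
        · exact absurd h.symm (ne_of_gt hlt')
        · exact absurd (lt_trans hlt' ((List.pairwise_cons.mp (by rwa [List.map_cons] at ha)).1 _ h)) (lt_irrefl _)
      have hnotrec : kb ∉ mergeViol bs ((ka, va) :: asrt) := by
        intro hc
        rcases mergeViol_support _ _ _ hc with h | h
        · exact absurd (hb.1 _ h) (lt_irrefl _)
        · rw [List.map_cons] at h
          rcases List.mem_cons.mp h with h | h
          · exact absurd h (ne_of_lt hlt')
          · exact absurd (lt_trans hlt' ((List.pairwise_cons.mp (by rwa [List.map_cons] at ha)).1 _ h)) (lt_irrefl _)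
      have hl1 : List.lookup kb ((kb, vb) :: bs) = some vb := by simp [List.lookup]
      simp only [List.mem_append, hl1, hnone]
      constructor
      · rintro (h | h)
        · split at h
          · next hc => exact ⟨hc, by simp⟩
          · simp at h
        · exact absurd h hnotrec
      · rintro ⟨hal, _⟩; left; simp [hal]
    · have hq : (k == kb) = false := beq_eq_false_iff_ne.mpr (fun h => hkk h.symm)
      have hlk : List.lookup k ((kb, vb) :: bs) = List.lookup k bs := by
        simp [List.lookup, hq]
      simp only [List.mem_append, hlk]
      rw [← ih hb.2 ha]
      constructor
      · rintro (h | h)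
        · exfalso; split at h <;> simp_all
        · exact h
      · exact Or.inr
  | case5 kb vb bs ka va asrt heq hlt ih =>
    rw [List.map_cons, List.pairwise_cons] at ha
    have hgt : ka < kb := by
      have h1 : kb ≠ ka := by simpa using heq
      exact lt_of_le_of_ne (le_of_not_gt (by simpa using hlt)) (Ne.symm h1)
    by_cases hkk : ka = k
    · subst hkk
      have hnone : List.lookup ka ((kb, vb) :: bs) = none := by
        rw [lookup_eq_none_iff]
        intro hm
        rw [List.map_cons] at hm
        rcases List.mem_cons.mp hm with h | h
        · exact absurd h.symm (ne_of_gt hgt)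
        · exact absurd (lt_trans hgt ((List.pairwise_cons.mp (by rwa [List.map_cons] at hb)).1 _ h)) (lt_irrefl _)
      have hnotrec : ka ∉ mergeViol ((kb, vb) :: bs) asrt := by
        intro hc
        rcases mergeViol_support _ _ _ hc with h | h
        · rw [List.map_cons] at h
          rcases List.mem_cons.mp h with h | h
          · exact absurd h (ne_of_lt hgt)
          · exact absurd (lt_trans hgt ((List.pairwise_cons.mp (by rwa [List.map_cons] at hb)).1 _ h)) (lt_irrefl _)
        · exact absurd (ha.1 _ h) (lt_irrefl _)
      have hl2 : List.lookup ka ((ka, va) :: asrt) = some va := by simp [List.lookup]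
      simp only [List.mem_append, hl2, hnone]
      constructor
      · rintro (h | h)
        · split at h
          · next hc => exact ⟨hc, by simp⟩
          · simp at h
        · exact absurd h hnotrec
      · rintro ⟨hal, _⟩; left; simp [hal]
    · have hq : (k == ka) = false := beq_eq_false_iff_ne.mpr (fun h => hkk h.symm)
      have hlk : List.lookup k ((ka, va) :: asrt) = List.lookup k asrt := by
        simp [List.lookup, hq]
      simp only [List.mem_append, hlk]
      rw [← ih hb ha.2]
      constructor
      · rintro (h | h)
        · exfalso; split at h <;> simp_all
        · exact h
      · exact Or.inr

-- differing lookups force membership in one of the key lists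
theorem mem_keys_of_ne (db da : PySem.Dict String String) (k : String)
    (h : db.get? k ≠ da.get? k) : k ∈ db.keys ∨ k ∈ da.keys := by
  by_contra hc
  simp only [not_or] at hc
  have h1 : db.get? k = none := by
    rw [PySem.Dict.get?_eq_none_iff_not_mem_keys]; exact hc.1
  have h2 : da.get? k = none := by
    rw [PySem.Dict.get?_eq_none_iff_not_mem_keys]; exact hc.2
  exact h (h1.trans h2.symm)

-- ===== VERDICT (by name: the statement is the Claim_ definition above) =====
theorem detect_scope_violations_py_spec : Claim_equal_detect_scope_violations_py := by
  intro before after _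
  unfold Spec_detect_scope_violations_py detect_scope_violations_py detect_scope_violations_py_alt
  rw [foldlA_filter]
  have hbk : (PySem.Dict.ofList before).keys.Nodup := PySem.Dict.nodup_keys_ofList before
  have hak : (PySem.Dict.ofList after).keys.Nodup := PySem.Dict.nodup_keys_ofList after
  set db := PySem.Dict.ofList before
  set da := PySem.Dict.ofList after
  set U := PySem.Set.union (PySem.Set.ofList db.keys) da.keys with hU
  set Sl := PySem.List.sorted U (fun x => x) false with hSldef
  set q := fun p => !(PySem.Dict.get? db p == PySem.Dict.get? da p) && !(is_allowed_mutation p) with hq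
  have hUnodup : U.Nodup := PySem.Set.nodup_union _ _ (PySem.Set.nodup_ofList _)
  have hSlnodup : Sl.Nodup := (PySem.List.sorted_perm U (fun x => x) false).nodup_iff.mpr hUnodup
  have hSlle : Sl.Pairwise (fun a b => a ≤ b) := PySem.List.sorted_pairwise U (fun x => x)
  have hSlt : Sl.Pairwise (· < ·) := (hSlle.and hSlnodup).imp (fun h => lt_of_le_of_ne h.1 h.2)
  have hAlt : (Sl.filter q).Pairwise (· < ·) := hSlt.sublist (List.filter_sublist)
  have hAnodup : (Sl.filter q).Nodup := hSlnodup.filter q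
  set sb := PySem.List.sorted db.items (fun kv => kv.1) false with hsb
  set sa := PySem.List.sorted da.items (fun kv => kv.1) false with hsa
  have hsbp : (sb.map Prod.fst).Perm db.keys := (PySem.List.sorted_perm _ _ _).map Prod.fst
  have hsap : (sa.map Prod.fst).Perm da.keys := (PySem.List.sorted_perm _ _ _).map Prod.fst
  have hsbnd : (sb.map Prod.fst).Nodup := hsbp.nodup_iff.mpr hbk
  have hsand : (sa.map Prod.fst).Nodup := hsap.nodup_iff.mpr hak
  have hsble : (sb.map Prod.fst).Pairwise (· ≤ ·) := by
    have := PySem.List.sorted_pairwise db.items (fun kv => kv.1)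
    exact (List.pairwise_map).mpr this
  have hsale : (sa.map Prod.fst).Pairwise (· ≤ ·) := by
    have := PySem.List.sorted_pairwise da.items (fun kv => kv.1)
    exact (List.pairwise_map).mpr this
  have hsblt : (sb.map Prod.fst).Pairwise (· < ·) :=
    (hsble.and hsbnd).imp (fun h => lt_of_le_of_ne h.1 h.2)
  have hsalt : (sa.map Prod.fst).Pairwise (· < ·) :=
    (hsale.and hsand).imp (fun h => lt_of_le_of_ne h.1 h.2)
  have hBlt : (mergeViol sb sa).Pairwise (· < ·) := mergeViol_pairwise sb sa hsblt hsalt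
  have hlb : ∀ k, List.lookup k sb = db.get? k :=
    fun k => lookup_perm_items db sb (PySem.List.sorted_perm _ _ _) hsbnd k
  have hla : ∀ k, List.lookup k sa = da.get? k :=
    fun k => lookup_perm_items da sa (PySem.List.sorted_perm _ _ _) hsand k
  have memiff : ∀ x, x ∈ Sl.filter q ↔ x ∈ mergeViol sb sa := by
    intro x
    rw [mergeViol_mem sb sa hsblt hsalt x, hlb, hla]
    simp only [List.mem_filter, hSldef, PySem.List.mem_sorted, hU, PySem.Set.mem_union,
      PySem.Set.mem_ofList, hq, Bool.and_eq_true, Bool.not_eq_true', beq_eq_false_iff_ne, ne_eq]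
    constructor
    · rintro ⟨_, hne, hal⟩; exact ⟨by simpa using hal, hne⟩
    · rintro ⟨hal, hne⟩; exact ⟨mem_keys_of_ne db da x hne, hne, by simpa using hal⟩
  have hBnodup : (mergeViol sb sa).Nodup := hBlt.imp ne_of_lt
  have hperm : (mergeViol sb sa).Perm (Sl.filter q) :=
    (List.perm_ext_iff_of_nodup hBnodup hAnodup).mpr (fun x => (memiff x).symm)
  rw [List.nil_append]
  have h1 : PySem.List.sorted (Sl.filter q) (fun x => x) false = Sl.filter q :=
    PySem.List.sorted_eq_self_of_pairwise (Sl.filter q) (fun x => x) (hAlt.imp le_of_lt)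
  have h2 : PySem.List.sorted (Sl.filter q) (fun x => x) false = mergeViol sb sa :=
    PySem.List.sorted_eq_of_perm_of_pairwise_lt (Sl.filter q) (mergeViol sb sa) (fun x => x) hperm hBlt
  rw [← h1, h2]
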